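-- pv_equiv track=rewrite | github.com/joehart2001/spinit | src/spinit/bond_graph.py | ring_memberships_by_size
-- ===== SOURCE A (Python) =====
-- from collections import Counter
--
-- def ring_memberships_by_size(
--     ring_sizes_per_atom: list[list[int]],
--     sizes=(3, 4, 5, 6, 7, 8),
-- ) -> dict[int, int]:
--     """Count per-atom ring memberships by ring size (not unique ring count)."""
--     counts = Counter()
--     allowed = set(sizes)
--     for atom_ring_sizes in ring_sizes_per_atom:
--         for ring_size in atom_ring_sizes:
--             if ring_size in allowed:
--                 counts[ring_size] += 1
--     return {size: int(counts.get(size, 0)) for size in sizes}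
-- ===== SOURCE B (Python) =====
-- def ring_memberships_by_size(
--     ring_sizes_per_atom: list[list[int]],
--     sizes=(3, 4, 5, 6, 7, 8),
-- ) -> dict[int, int]:
--     """Count per-atom ring memberships by ring size (not unique ring count)."""
--     return {size: sum(sub.count(size) for sub in ring_sizes_per_atom)
--             for size in sizes}
-- ===== Notes on version B (the rewrite author's own statement) =====
-- stated objective: idiomatic
-- what changed: Replaces the single-pass Counter built over a filtered nested loop (with an 'allowed' set) by a dict comprehension that, for each requested size, sums list.count over the per-atom lists; no Counter and no membership filter are needed.
import Mathlib
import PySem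

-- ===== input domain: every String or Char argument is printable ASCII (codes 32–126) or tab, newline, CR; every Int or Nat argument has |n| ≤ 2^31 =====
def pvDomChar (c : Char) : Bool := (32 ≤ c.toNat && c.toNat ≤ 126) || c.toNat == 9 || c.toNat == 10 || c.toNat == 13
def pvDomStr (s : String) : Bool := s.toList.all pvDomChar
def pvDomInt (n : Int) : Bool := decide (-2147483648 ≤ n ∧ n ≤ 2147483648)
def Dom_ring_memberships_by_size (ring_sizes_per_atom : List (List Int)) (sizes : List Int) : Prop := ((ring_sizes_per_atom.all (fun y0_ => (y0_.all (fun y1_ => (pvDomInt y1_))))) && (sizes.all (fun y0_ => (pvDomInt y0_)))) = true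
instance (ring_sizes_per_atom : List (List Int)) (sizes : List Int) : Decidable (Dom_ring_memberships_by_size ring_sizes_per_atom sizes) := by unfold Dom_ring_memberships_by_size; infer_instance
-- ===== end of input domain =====

-- B replaces A's Counter built over a filtered nested loop by a per-size sum of list.count; same values, plainer code.


-- ===== PORT A =====
def ring_memberships_by_size (ring_sizes_per_atom : List (List Int)) (sizes : List Int) : List (Int × Int) :=
  let allowed : PySem.Set Int := PySem.Set.ofList sizes
  let counts : PySem.Dict Int Int :=
    ring_sizes_per_atom.foldl (fun c atom_ring_sizes =>
      atom_ring_sizes.foldl (fun c ring_size =>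
        if allowed.contains ring_size then c.modify ring_size 0 (· + 1) else c) c)
      PySem.Dict.empty
  (sizes.foldl (fun d size => d.insert size (counts.getD size 0)) PySem.Dict.empty).items

-- ===== PORT B =====
def ring_memberships_by_size_alt (ring_sizes_per_atom : List (List Int)) (sizes : List Int) : List (Int × Int) :=
  (sizes.foldl (fun d size =>
      d.insert size ((ring_sizes_per_atom.map (fun sub => (sub.count size : Int))).sum))
    PySem.Dict.empty).items

-- ===== PRECONDITION & SPEC =====
def Spec_ring_memberships_by_size (ring_sizes_per_atom : List (List Int)) (sizes : List Int) (out : List (Int × Int)) : Prop := out = ring_memberships_by_size_alt ring_sizes_per_atom sizes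
instance (ring_sizes_per_atom : List (List Int)) (sizes : List Int) (out : List (Int × Int)) : Decidable (Spec_ring_memberships_by_size ring_sizes_per_atom sizes out) := by unfold Spec_ring_memberships_by_size; infer_instance

-- ===== CLAIM (what is proved, stated in full; the proofs are below) =====
def Claim_equal_ring_memberships_by_size : Prop := ∀ (ring_sizes_per_atom : List (List Int)) (sizes : List Int), Dom_ring_memberships_by_size ring_sizes_per_atom sizes → Spec_ring_memberships_by_size ring_sizes_per_atom sizes (ring_memberships_by_size ring_sizes_per_atom sizes)

-- ===== LEMMAS AND PROOFS =====

-- Inner loop: folding one atom's ring sizes adds that atom's count of s to the entry at s,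
-- provided s itself passes the membership filter; entries at other keys do not disturb s.
theorem getD_inner_fold (allowed : PySem.Set Int) (atom : List Int) (s : Int)
    (hs : allowed.contains s = true) (c : PySem.Dict Int Int) :
    (atom.foldl (fun c r => if allowed.contains r then c.modify r 0 (· + 1) else c) c).getD s 0
      = c.getD s 0 + (atom.count s : Int) := by
  induction atom generalizing c with
  | nil => simp
  | cons r rest ih =>
    simp only [List.foldl_cons]
    split_ifs with hr
    · rw [ih]
      by_cases hrs : r = s
      · subst hrs
        rw [PySem.Dict.getD_modify_self, List.count_cons_self]
        push_cast; ring
      · rw [PySem.Dict.getD_modify_of_ne c 0 (· + 1) (fun h => hrs h.symm)]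
        simp [hrs]
    · rw [ih]
      have hrs : r ≠ s := fun h => hr (h ▸ hs)
      simp [hrs]

-- Outer loop: the whole counter's entry at s (s passing the filter) is the sum over atoms
-- of each atom's count of s.
theorem getD_outer_fold (allowed : PySem.Set Int) (atoms : List (List Int)) (s : Int)
    (hs : allowed.contains s = true) (c : PySem.Dict Int Int) :
    (atoms.foldl (fun c atom =>
        atom.foldl (fun c r => if allowed.contains r then c.modify r 0 (· + 1) else c) c) c).getD s 0
      = c.getD s 0 + (atoms.map (fun sub => (sub.count s : Int))).sum := by
  induction atoms generalizing c with
  | nil => simp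
  | cons atom rest ih =>
    simp only [List.foldl_cons, ih, List.map_cons, List.sum_cons,
      getD_inner_fold allowed atom s hs c]
    ring

-- ===== VERDICT (by name: the statement is the Claim_ definition above) =====
theorem ring_memberships_by_size_spec : Claim_equal_ring_memberships_by_size := by
  intro rspa sizes _
  unfold Spec_ring_memberships_by_size ring_memberships_by_size ring_memberships_by_size_alt
  dsimp only
  congr 1
  apply PySem.List.foldl_congr_mem
  intro d s hmem
  congr 1
  have hs : (PySem.Set.ofList sizes).contains s = true := by
    have : s ∈ PySem.Set.ofList sizes := (PySem.Set.mem_ofList sizes s).2 hmem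
    simpa [List.contains_iff_mem] using this
  rw [getD_outer_fold _ _ _ hs]
  simp
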